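-- pv_equiv track=rewrite | github.com/AnthusAI/Plexus | plexus/cli/shared/optimizer_shadow_invalidation.py | normalize_shadow_invalid_feedback_item_ids
-- ===== SOURCE A (Python) =====
-- from typing import Any, Dict, List, Mapping, Optional, Sequence, Tuple
--
-- def normalize_shadow_invalid_feedback_item_ids(value: Any) -> List[str]:
--     if value is None:
--         return []
--     if isinstance(value, str):
--         raw_values = [value]
--     elif isinstance(value, Sequence):
--         raw_values = list(value)
--     else:
--         return []
--
--     normalized: List[str] = []
--     seen = set()
--     for raw in raw_values:
--         item_id = str(raw or "").strip()
--         if not item_id or item_id in seen: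
--             continue
--         seen.add(item_id)
--         normalized.append(item_id)
--     normalized.sort()
--     return normalized
-- ===== SOURCE B (Python) =====
-- from typing import Any, List, Sequence
--
-- def normalize_shadow_invalid_feedback_item_ids(value: Any) -> List[str]:
--     if value is None:
--         return []
--     if isinstance(value, str):
--         raw_values = [value]
--     elif isinstance(value, Sequence):
--         raw_values = list(value)
--     else:
--         return []
--     items = sorted(s for s in (str(raw or "").strip() for raw in raw_values) if s)
--     out: List[str] = []
--     for s in items:
--         if not out or out[-1] != s:
--             out.append(s)
--     return out
-- ===== Notes on version B (the rewrite author's own statement) =====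
-- stated objective: alternative
-- what changed: Replaces hash-set deduplication followed by a sort with sort-first then a single linear pass dropping adjacent duplicates; no seen-set is maintained.
import Mathlib
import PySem

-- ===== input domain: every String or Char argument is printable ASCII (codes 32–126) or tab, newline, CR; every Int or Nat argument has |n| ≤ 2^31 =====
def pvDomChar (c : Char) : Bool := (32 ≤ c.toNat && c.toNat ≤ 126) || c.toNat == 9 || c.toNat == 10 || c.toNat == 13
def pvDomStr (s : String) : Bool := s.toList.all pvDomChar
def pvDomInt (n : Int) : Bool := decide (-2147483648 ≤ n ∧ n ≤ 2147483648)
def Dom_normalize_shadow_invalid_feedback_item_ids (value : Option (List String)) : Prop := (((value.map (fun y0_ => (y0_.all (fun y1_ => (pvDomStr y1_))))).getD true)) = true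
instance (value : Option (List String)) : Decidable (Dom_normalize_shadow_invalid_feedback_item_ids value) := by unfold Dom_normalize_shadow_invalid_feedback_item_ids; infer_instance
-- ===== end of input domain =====

-- B replaces A's seen-set deduplication followed by a sort with sort-first then one
-- adjacent-duplicate-dropping pass (alternative decomposition, same asymptotic cost).

-- ===== PORT A =====
-- A's loop state: (normalized, seen); 'str(raw or "").strip()' on a string is just .strip()
def normalize_shadow_invalid_feedback_item_ids (value : Option (List String)) : List String :=
  match value with
  | none => []
  | some raw_values =>
    let st := raw_values.foldl
      (fun (acc : List String × PySem.Set String) raw =>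
        let item_id := PySem.Str.strip raw
        if item_id = "" ∨ PySem.Set.contains acc.2 item_id = true then acc
        else (acc.1 ++ [item_id], PySem.Set.add acc.2 item_id))
      ([], PySem.Set.empty)
    PySem.List.sorted st.1 (fun x => x) false

-- ===== PORT B =====
def normalize_shadow_invalid_feedback_item_ids_alt (value : Option (List String)) : List String :=
  match value with
  | none => []
  | some raw_values =>
    let items := PySem.List.sorted
      ((raw_values.map PySem.Str.strip).filter (fun s => decide (s ≠ ""))) (fun x => x) false
    items.foldl
      (fun (out : List String) s =>
        if out = [] ∨ out.getLast? ≠ some s then out ++ [s] else out)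
      []

-- ===== PRECONDITION & SPEC =====
def Spec_normalize_shadow_invalid_feedback_item_ids (value : Option (List String)) (out : List String) : Prop := out = normalize_shadow_invalid_feedback_item_ids_alt value
instance (value : Option (List String)) (out : List String) : Decidable (Spec_normalize_shadow_invalid_feedback_item_ids value out) := by unfold Spec_normalize_shadow_invalid_feedback_item_ids; infer_instance

-- ===== CLAIM (what is proved, stated in full; the proofs are below) =====
def Claim_equal_normalize_shadow_invalid_feedback_item_ids : Prop := ∀ (value : Option (List String)), Dom_normalize_shadow_invalid_feedback_item_ids value → Spec_normalize_shadow_invalid_feedback_item_ids value (normalize_shadow_invalid_feedback_item_ids value)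

-- ===== LEMMAS AND PROOFS =====

-- the per-element step of A's loop, on the 'normalized' component only
def pvStepA (n : List String) (raw : String) : List String :=
  let item_id := PySem.Str.strip raw
  if item_id = "" ∨ PySem.Set.contains n item_id = true then n else n ++ [item_id]

-- A's pair loop keeps seen = normalized
theorem pvLoopA_pair (xs : List String) (n : List String) :
    xs.foldl
      (fun (acc : List String × PySem.Set String) raw =>
        let item_id := PySem.Str.strip raw
        if item_id = "" ∨ PySem.Set.contains acc.2 item_id = true then acc
        else (acc.1 ++ [item_id], PySem.Set.add acc.2 item_id))
      (n, n) = (xs.foldl pvStepA n, xs.foldl pvStepA n) := by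
  induction xs generalizing n with
  | nil => rfl
  | cons raw xs ih =>
    simp only [List.foldl_cons, pvStepA]
    by_cases h : PySem.Str.strip raw = "" ∨ PySem.Set.contains n (PySem.Str.strip raw) = true
    · simp only [if_pos h]; exact ih n
    · simp only [if_neg h]
      have hadd : PySem.Set.add n (PySem.Str.strip raw) = n ++ [PySem.Str.strip raw] := by
        simp only [PySem.Set.add, PySem.Set.contains] at *
        rw [if_neg]
        intro hc
        exact h (Or.inr (by simpa [PySem.Set.contains] using hc))
      rw [hadd]; exact ih _

-- normalization-filtering of the raw list
def pvG (xs : List String) : List String :=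
  (xs.map PySem.Str.strip).filter (fun s => decide (s ≠ ""))

theorem pvLoopA_eq_fold_add (xs : List String) (n : List String) :
    xs.foldl pvStepA n = (pvG xs).foldl PySem.Set.add n := by
  induction xs generalizing n with
  | nil => rfl
  | cons raw xs ih =>
    simp only [List.foldl_cons, pvG, List.map_cons, List.filter_cons]
    by_cases he : PySem.Str.strip raw = ""
    · have h1 : pvStepA n raw = n := by simp [pvStepA, he]
      rw [h1]
      have h2 := ih n
      simp only [pvG] at h2
      simpa [he] using h2
    · have h1 : pvStepA n raw = PySem.Set.add n (PySem.Str.strip raw) := by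
        simp [pvStepA, PySem.Set.add, PySem.Set.contains, he]
      rw [h1]
      have h2 := ih (PySem.Set.add n (PySem.Str.strip raw))
      simp only [pvG] at h2
      simpa [he] using h2

-- adjacent-dedup in recursive form (proof-side mirror of B's fold)
def pvAdjFrom : String → List String → List String
  | _, [] => []
  | prev, b :: rest => if b = prev then pvAdjFrom prev rest else b :: pvAdjFrom b rest

def pvAdj : List String → List String
  | [] => []
  | a :: rest => a :: pvAdjFrom a rest

theorem pvAdjFrom_nil (prev : String) : pvAdjFrom prev [] = [] := rfl
theorem pvAdjFrom_cons_self (prev : String) (rest : List String) :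
    pvAdjFrom prev (prev :: rest) = pvAdjFrom prev rest := by simp [pvAdjFrom]
theorem pvAdjFrom_cons_ne {b prev : String} (rest : List String) (h : b ≠ prev) :
    pvAdjFrom prev (b :: rest) = b :: pvAdjFrom b rest := by simp [pvAdjFrom, h]

-- B's fold equals the recursive adjacent-dedup
theorem pvFoldB_bridge (m : List String) : ∀ (pre : List String) (last : String),
    m.foldl
      (fun (out : List String) s =>
        if out = [] ∨ out.getLast? ≠ some s then out ++ [s] else out)
      (pre ++ [last]) = pre ++ last :: pvAdjFrom last m := by
  induction m with
  | nil => intro pre last; simp [pvAdjFrom_nil]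
  | cons s m ih =>
    intro pre last
    simp only [List.foldl_cons]
    by_cases h : s = last
    · subst h
      have hcond : ¬ ((pre ++ [s]) = [] ∨ (pre ++ [s]).getLast? ≠ some s) := by
        simp
      rw [if_neg hcond, ih, pvAdjFrom_cons_self]
    · have hcond : ((pre ++ [last]) = [] ∨ (pre ++ [last]).getLast? ≠ some s) := by
        simp
        intro hl; exact h hl.symm
      rw [if_pos hcond]
      have : pre ++ [last] ++ [s] = (pre ++ [last]) ++ [s] := rfl
      rw [this, ih (pre ++ [last]) s, pvAdjFrom_cons_ne _ h]
      simp

theorem pvFoldB_eq_adj (m : List String) :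
    m.foldl
      (fun (out : List String) s =>
        if out = [] ∨ out.getLast? ≠ some s then out ++ [s] else out)
      [] = pvAdj m := by
  cases m with
  | nil => rfl
  | cons a rest =>
    simp only [List.foldl_cons]
    rw [if_pos (Or.inl trivial)]
    simpa [pvAdj] using pvFoldB_bridge rest [] a

theorem pvAdjFrom_mem (m : List String) : ∀ (prev : String),
    m.Pairwise (· ≤ ·) → (∀ x ∈ m, prev ≤ x) →
    ∀ x, x ∈ pvAdjFrom prev m ↔ (x ∈ m ∧ x ≠ prev) := by
  induction m with
  | nil => intro prev _ _ x; simp [pvAdjFrom]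
  | cons b rest ih =>
    intro prev hp hall x
    have hp' := (List.pairwise_cons.mp hp)
    by_cases h : b = prev
    · subst h
      rw [pvAdjFrom_cons_self, ih b hp'.2 hp'.1 x]
      constructor
      · rintro ⟨hx, hne⟩; exact ⟨List.mem_cons_of_mem _ hx, hne⟩
      · rintro ⟨hx, hne⟩
        rcases List.mem_cons.mp hx with h1 | h1
        · exact absurd h1 hne
        · exact ⟨h1, hne⟩
    · have hpb : prev < b := lt_of_le_of_ne (hall b (List.mem_cons_self)) (Ne.symm h)
      rw [pvAdjFrom_cons_ne _ h, List.mem_cons, ih b hp'.2 hp'.1 x]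
      constructor
      · rintro (h1 | ⟨h1, h2⟩)
        · exact ⟨by simp [h1], by rw [h1]; exact ne_of_gt hpb⟩
        · refine ⟨List.mem_cons_of_mem _ h1, ?_⟩
          have : b ≤ x := hp'.1 x h1
          exact ne_of_gt (lt_of_lt_of_le hpb this)
      · rintro ⟨hx, hne⟩
        rcases List.mem_cons.mp hx with h1 | h1
        · exact Or.inl h1
        · by_cases hxb : x = b
          · exact Or.inl hxb
          · exact Or.inr ⟨h1, hxb⟩

theorem pvAdjFrom_pairwise (m : List String) : ∀ (prev : String),
    m.Pairwise (· ≤ ·) → (∀ x ∈ m, prev ≤ x) →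
    (prev :: pvAdjFrom prev m).Pairwise (· < ·) := by
  induction m with
  | nil => intro prev _ _; simp [pvAdjFrom]
  | cons b rest ih =>
    intro prev hp hall
    have hp' := (List.pairwise_cons.mp hp)
    by_cases h : b = prev
    · subst h
      rw [pvAdjFrom_cons_self]
      exact ih b hp'.2 hp'.1
    · have hpb : prev < b := lt_of_le_of_ne (hall b (List.mem_cons_self)) (Ne.symm h)
      rw [pvAdjFrom_cons_ne _ h]
      have htail := ih b hp'.2 hp'.1
      rw [List.pairwise_cons]
      refine ⟨?_, htail⟩
      intro x hx
      rcases List.mem_cons.mp hx with h1 | h1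
      · rw [h1]; exact hpb
      · have hxmem := ((pvAdjFrom_mem rest b hp'.2 hp'.1 x).mp h1).1
        exact lt_of_lt_of_le hpb (hp'.1 x hxmem)

-- the core identity: sorted-then-dedup (A) = sort-then-adjacent-dedup (B)
theorem pvKey (l : List String) :
    PySem.List.sorted (PySem.List.dedup l) (fun x => x) false
      = pvAdj (PySem.List.sorted l (fun x => x) false) := by
  set s := PySem.List.sorted l (fun x => x) false with hs
  have hps : s.Pairwise (· ≤ ·) := by
    have := PySem.List.sorted_pairwise (xs := l) (key := fun x => x)
    simpa [hs] using this
  have hperm_s : s.Perm l := PySem.List.sorted_perm l (fun x => x) false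
  have hmem_adj : ∀ x, x ∈ pvAdj s ↔ x ∈ s := by
    intro x
    cases hsc : s with
    | nil => simp [pvAdj]
    | cons a rest =>
      have hp' := List.pairwise_cons.mp (hsc ▸ hps)
      simp only [pvAdj, List.mem_cons]
      rw [pvAdjFrom_mem rest a hp'.2 hp'.1 x]
      constructor
      · rintro (h1 | ⟨h1, _⟩)
        · exact Or.inl h1
        · exact Or.inr h1
      · rintro (h1 | h1)
        · exact Or.inl h1
        · by_cases hxa : x = a
          · exact Or.inl hxa
          · exact Or.inr ⟨h1, hxa⟩
  have hpw_adj : (pvAdj s).Pairwise (· < ·) := by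
    cases hsc : s with
    | nil => simp [pvAdj]
    | cons a rest =>
      have hp' := List.pairwise_cons.mp (hsc ▸ hps)
      simpa [pvAdj] using pvAdjFrom_pairwise rest a hp'.2 hp'.1
  have hnd_adj : (pvAdj s).Nodup := hpw_adj.imp (fun h => ne_of_lt h)
  have hnd_ded : (PySem.List.dedup l).Nodup := PySem.List.nodup_dedup l
  have hperm : (pvAdj s).Perm (PySem.List.dedup l) := by
    rw [List.perm_ext_iff_of_nodup hnd_adj hnd_ded]
    intro x
    rw [hmem_adj x, PySem.List.mem_dedup]
    exact ⟨fun h => hperm_s.mem_iff.mp h, fun h => hperm_s.mem_iff.mpr h⟩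
  exact PySem.List.sorted_eq_of_perm_of_pairwise_lt _ _ _ hperm hpw_adj

-- ===== VERDICT (by name: the statement is the Claim_ definition above) =====
theorem normalize_shadow_invalid_feedback_item_ids_spec : Claim_equal_normalize_shadow_invalid_feedback_item_ids := by
  intro value _
  unfold Spec_normalize_shadow_invalid_feedback_item_ids
  unfold normalize_shadow_invalid_feedback_item_ids normalize_shadow_invalid_feedback_item_ids_alt
  cases value with
  | none => rfl
  | some xs =>
    simp only
    have hempty : (PySem.Set.empty : PySem.Set String) = ([] : List String) := rfl
    rw [hempty, pvLoopA_pair xs []]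
    rw [pvLoopA_eq_fold_add xs []]
    have hded : (pvG xs).foldl PySem.Set.add [] = PySem.List.dedup (pvG xs) := by
      rw [PySem.List.dedup_eq_ofList, PySem.Set.ofList_eq_foldl]
    rw [hded, pvFoldB_eq_adj]
    exact pvKey (pvG xs)
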